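-- pv_equiv track=rewrite | github.com/MrBrantCode/unitest_baseline | mut_generate/mist_train_taco/taco_7771/solution.py | can_kate_escape
-- ===== SOURCE A (Python) =====
-- def can_kate_escape(maze):
--     MOVES = {(0, 1), (0, -1), (1, 0), (-1, 0)}
--
--     # Find Kate's position
--     kate_positions = [(x, y) for x in range(len(maze)) for y in range(len(maze[x])) if maze[x][y] == 'k']
--
--     if len(kate_positions) != 1:
--         raise ValueError("There should be exactly one 'k' in the maze.")
--
--     kate_pos = kate_positions[0]
--     seen = set([kate_pos])
--     pos_set = set([kate_pos])
--
--     while pos_set: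
--         (x, y) = pos_set.pop()
--
--         # Check if Kate is at the boundary
--         if any((not (0 <= x + dx < len(maze) and 0 <= y + dy < len(maze[x + dx])) for (dx, dy) in MOVES)):
--             return True
--
--         # Find valid neighbors
--         neighbors = {(x + dx, y + dy) for (dx, dy) in MOVES
--                      if 0 <= x + dx < len(maze) and 0 <= y + dy < len(maze[x + dx])
--                      and maze[x + dx][y + dy] == ' '
--                      and (x + dx, y + dy) not in seen}
--
--         pos_set |= neighbors
--         seen |= neighbors
--
--     return False
-- ===== SOURCE B (Python) =====
-- def can_kate_escape(maze):
--     # Find Kate's position (same prelude as the original)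
--     kate_positions = [(x, y) for x in range(len(maze)) for y in range(len(maze[x])) if maze[x][y] == 'k']
--     if len(kate_positions) != 1:
--         raise ValueError("There should be exactly one 'k' in the maze.")
--     start = kate_positions[0]
--
--     # Connected-component labeling by fixed point: no frontier/worklist at all.
--     # Repeatedly sweep the whole (ragged) grid, adding any ' ' cell that touches
--     # an already-reached cell, until a full sweep adds nothing.
--     reached = {start}
--     changed = True
--     while changed:
--         changed = False
--         for x in range(len(maze)):
--             for y in range(len(maze[x])):
--                 if (x, y) not in reached and maze[x][y] == ' ' and any(
--                         (x + dx, y + dy) in reached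
--                         for dx, dy in ((0, 1), (0, -1), (1, 0), (-1, 0))):
--                     reached.add((x, y))
--                     changed = True
--
--     # Kate escapes iff some reached cell has a neighbor outside the ragged grid.
--     return any(
--         not (0 <= x + dx < len(maze) and 0 <= y + dy < len(maze[x + dx]))
--         for (x, y) in reached
--         for dx, dy in ((0, 1), (0, -1), (1, 0), (-1, 0)))
-- ===== Notes on version B (the rewrite author's own statement) =====
-- stated objective: alternative
-- what changed: Replaced the worklist flood fill (set frontier, pop-and-expand with per-cell early boundary return) by frontier-free connected-component labeling: repeated whole-grid sweeps that add any space cell adjacent to an already-reached cell until a sweep is stable, followed by a single boundary scan over the reached set.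
import Mathlib
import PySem

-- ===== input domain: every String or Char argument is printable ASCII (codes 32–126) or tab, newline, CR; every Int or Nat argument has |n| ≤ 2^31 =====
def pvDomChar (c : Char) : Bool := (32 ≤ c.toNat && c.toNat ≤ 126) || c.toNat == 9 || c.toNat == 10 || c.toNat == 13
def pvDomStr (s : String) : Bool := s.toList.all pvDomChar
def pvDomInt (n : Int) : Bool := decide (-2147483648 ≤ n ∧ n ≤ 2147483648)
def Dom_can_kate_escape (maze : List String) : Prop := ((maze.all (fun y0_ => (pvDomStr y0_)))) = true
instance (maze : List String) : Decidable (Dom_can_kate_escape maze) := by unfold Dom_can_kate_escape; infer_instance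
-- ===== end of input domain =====

-- B replaces A's worklist flood fill (set frontier, pop-and-expand, early boundary return) by
-- frontier-free connected-component labeling: whole-grid sweeps repeated to a fixed point, then
-- one boundary scan over the reached set (objective: alternative, same results, not faster).

-- ===== shared low-level helpers (both Pythons perform these tests textually) =====

-- the four moves; Python A iterates them as a set of 4 distinct literal tuples, whose hash
-- iteration order cannot affect the Boolean result, so both ports traverse this literal list
def movesL : List (Int × Int) := [(0, 1), (0, -1), (1, 0), (-1, 0)]

-- maze[x] as a list of chars ('getD ""' is never reached under the bounds guards below)
def rowAt (maze : List String) (x : Int) : List Char :=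
  ((PySem.List.pyGet? maze x).getD "").toList

-- 0 <= x < len(maze) and 0 <= y < len(maze[x])   (short-circuit order as in Python)
def inB (maze : List String) (q : Int × Int) : Bool :=
  decide (0 ≤ q.1) && decide (q.1 < (maze.length : Int)) &&
  decide (0 ≤ q.2) && decide (q.2 < ((rowAt maze q.1).length : Int))

-- maze[x][y] == ' '   (only queried on in-bounds cells)
def isSpace (maze : List String) (q : Int × Int) : Bool :=
  PySem.List.pyGet? (rowAt maze q.1) q.2 == some ' '

-- [(x, y) for x in range(len(maze)) for y in range(len(maze[x])) if maze[x][y] == 'k']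
def katePositions (maze : List String) : List (Int × Int) :=
  maze.zipIdx.flatMap (fun rx =>
    rx.1.toList.zipIdx.filterMap (fun cy =>
      if cy.1 = 'k' then some ((rx.2 : Int), (cy.2 : Int)) else none))

-- all in-bounds cells in Python's scan order (x outer, y inner); its length + 1 bounds the
-- number of loop iterations / sweeps in both ports (fuel is a totality guard only)
def allCells (maze : List String) : List (Int × Int) :=
  (List.range maze.length).flatMap (fun (x : Nat) =>
    (List.range (rowAt maze (Int.ofNat x)).length).map (fun (y : Nat) =>
      (Int.ofNat x, Int.ofNat y)))

-- any(not (0 <= x+dx < len(maze) and 0 <= y+dy < len(maze[x+dx])) for (dx,dy) in MOVES)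
def bAdj (maze : List String) (p : Int × Int) : Bool :=
  movesL.any (fun d => !(inB maze (p.1 + d.1, p.2 + d.2)))

-- ===== PORT A =====

-- {(x+dx, y+dy) for (dx,dy) in MOVES if in-bounds and ' ' and not in seen}
def freshNbrs (maze : List String) (p : Int × Int) (seen : List (Int × Int)) :
    List (Int × Int) :=
  (movesL.map (fun d => (p.1 + d.1, p.2 + d.2))).filter
    (fun q => inB maze q && isSpace maze q && !(seen.contains q))

-- the while loop; set.pop() takes an arbitrary element (the Boolean result does not depend
-- on the order), modelled as taking the head; 'seen |= / pos_set |= neighbors' append the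
-- fresh elements (they are disjoint from both sets).  fuel is a totality guard only.
def loopA (maze : List String) :
    Nat → List (Int × Int) → List (Int × Int) → Bool
  | 0, _, _ => false
  | fuel + 1, seen, posSet =>
    match posSet with
    | [] => false
    | p :: rest =>
      if bAdj maze p then true
      else
        let nbrs := freshNbrs maze p seen
        loopA maze fuel (seen ++ nbrs) (rest ++ nbrs)

def can_kate_escape (maze : List String) : Bool :=
  match katePositions maze with
  | [start] => loopA maze ((allCells maze).length + 1) [start] [start]
  | _ => false   -- Python raises ValueError here (outside Pre_)

-- ===== PORT B =====

-- the sweep condition: (x,y) not in reached and maze[x][y] == ' ' and any neighbor in reached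
def condS (maze : List String) (R : List (Int × Int)) (q : Int × Int) : Bool :=
  !(R.contains q) && isSpace maze q &&
    movesL.any (fun d => R.contains (q.1 + d.1, q.2 + d.2))

-- one full sweep of the grid in scan order, adding cells as it goes (as the Python does)
def sweep (maze : List String) (R : List (Int × Int)) : List (Int × Int) :=
  (allCells maze).foldl (fun acc q => if condS maze acc q then acc ++ [q] else acc) R

-- while changed: sweep until a sweep adds nothing.  fuel is a totality guard only.
def fixB (maze : List String) : Nat → List (Int × Int) → List (Int × Int)
  | 0, R => R
  | fuel + 1, R =>
    let R' := sweep maze R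
    if R' = R then R else fixB maze fuel R'

def can_kate_escape_alt (maze : List String) : Bool :=
  let kp := katePositions maze
  if kp.length = 1 then
    let start := kp.headD (0, 0)
    let reached := fixB maze ((allCells maze).length + 1) [start]
    reached.any (fun p => bAdj maze p)
  else false   -- Python raises ValueError here (outside Pre_)

-- ===== PRECONDITION & SPEC =====
-- Pre_ excludes exactly the mazes without exactly one 'k', on which Python A raises ValueError
def Pre_can_kate_escape (maze : List String) : Prop :=
  (maze.flatMap (fun r => r.toList)).count 'k' = 1
instance (maze : List String) : Decidable (Pre_can_kate_escape maze) := by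
  unfold Pre_can_kate_escape; infer_instance
def pvWitness_can_kate_escape : List String := ["k"]

def Spec_can_kate_escape (maze : List String) (out : Bool) : Prop := out = can_kate_escape_alt maze
instance (maze : List String) (out : Bool) : Decidable (Spec_can_kate_escape maze out) := by unfold Spec_can_kate_escape; infer_instance

-- ===== CLAIM (what is proved, stated in full; the proofs are below) =====
def Claim_equal_can_kate_escape : Prop := ∀ (maze : List String), Dom_can_kate_escape maze → Pre_can_kate_escape maze → Spec_can_kate_escape maze (can_kate_escape maze)

-- ===== LEMMAS AND PROOFS =====

-- cells reachable from the pending list 'ps' by steps into in-bounds ' ' cells outside 'seen'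
inductive RX (maze : List String) (seen ps : List (Int × Int)) : (Int × Int) → Prop
  | base {q} : q ∈ ps → RX maze seen ps q
  | step {p q} : RX maze seen ps p → (∃ d ∈ movesL, q = (p.1 + d.1, p.2 + d.2)) →
      inB maze q = true → isSpace maze q = true → q ∉ seen → RX maze seen ps q

-- the order-free reachable set both programs compute
inductive Reach (maze : List String) (s : Int × Int) : (Int × Int) → Prop
  | base : Reach maze s s
  | step {p q} : Reach maze s p → (∃ d ∈ movesL, q = (p.1 + d.1, p.2 + d.2)) →
      inB maze q = true → isSpace maze q = true → Reach maze s q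

lemma RX_nil {maze seen q} : ¬ RX maze seen [] q := by
  intro h
  induction h with
  | base h => simp at h
  | step _ _ _ _ _ ih => exact ih

lemma RX_iff_Reach {maze s q} : RX maze [s] [s] q ↔ Reach maze s q := by
  constructor
  · intro h
    induction h with
    | base h => simp at h; subst h; exact Reach.base
    | step _ hd hb hs _ ih => exact Reach.step ih hd hb hs
  · intro h
    induction h with
    | base => exact RX.base (List.mem_singleton.2 rfl)
    | step _ hd hb hs ih =>
      rename_i p q' _
      by_cases hq : q' = s
      · exact RX.base (List.mem_singleton.2 hq)
      · exact RX.step ih hd hb hs (by simpa using hq)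

lemma mem_freshNbrs {maze p seen q} :
    q ∈ freshNbrs maze p seen ↔
      (∃ d ∈ movesL, q = (p.1 + d.1, p.2 + d.2)) ∧
        inB maze q = true ∧ isSpace maze q = true ∧ q ∉ seen := by
  simp [freshNbrs, List.mem_filter, List.mem_map]
  aesop

lemma targets_nodup (p : Int × Int) :
    ((movesL.map (fun d => (p.1 + d.1, p.2 + d.2))).Nodup) := by
  apply List.Nodup.map
  · intro a b h
    rw [Prod.mk.injEq] at h
    rw [Prod.ext_iff]
    omega
  · decide

lemma freshNbrs_nodup (maze p seen) : (freshNbrs maze p seen).Nodup :=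
  List.Nodup.filter _ (targets_nodup p)

lemma transfer {maze seen p rest q} (hp : p ∈ seen)
    (h : RX maze seen (p :: rest) q) :
    RX maze (seen ++ freshNbrs maze p seen) (rest ++ freshNbrs maze p seen) q ∨ q = p := by
  induction h with
  | base h =>
    rcases List.mem_cons.1 h with h | h
    · exact Or.inr h
    · exact Or.inl (RX.base (List.mem_append_left _ h))
  | step _ hd hb hs hn ih =>
    rename_i p' q' _
    rcases ih with ih | rfl
    · by_cases hq : q' ∈ freshNbrs maze p seen
      · exact Or.inl (RX.base (List.mem_append_right _ hq))
      · refine Or.inl (RX.step ih hd hb hs ?_)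
        intro hmem
        rcases List.mem_append.1 hmem with h | h
        · exact hn h
        · exact hq h
    · exact Or.inl (RX.base (List.mem_append_right _ (mem_freshNbrs.2 ⟨hd, hb, hs, hn⟩)))

lemma untransfer {maze seen p rest q}
    (h : RX maze (seen ++ freshNbrs maze p seen) (rest ++ freshNbrs maze p seen) q) :
    RX maze seen (p :: rest) q := by
  induction h with
  | base h =>
    rcases List.mem_append.1 h with h | h
    · exact RX.base (List.mem_cons_of_mem _ h)
    · rcases mem_freshNbrs.1 h with ⟨hd, hb, hs, hn⟩
      exact RX.step (RX.base List.mem_cons_self) hd hb hs hn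
  | step _ hd hb hs hn ih =>
    exact RX.step ih hd hb hs (fun hm => hn (List.mem_append_left _ hm))

-- cells of the maze not yet seen; the termination measure is unseenCnt + pending length
def unseenCnt (maze : List String) (seen : List (Int × Int)) : Nat :=
  ((allCells maze).filter (fun a => decide (a ∉ seen))).length

lemma inB_mem_allCells {maze : List String} {q : Int × Int} (h : inB maze q = true) :
    q ∈ allCells maze := by
  obtain ⟨qx, qy⟩ := q
  simp only [inB, Bool.and_eq_true, decide_eq_true_eq] at h
  obtain ⟨⟨⟨h1, h2⟩, h3⟩, h4⟩ := h
  have e1 : Int.ofNat qx.toNat = qx := Int.toNat_of_nonneg h1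
  have e2 : Int.ofNat qy.toNat = qy := Int.toNat_of_nonneg h3
  apply List.mem_flatMap.2
  refine ⟨qx.toNat, List.mem_range.2 (by omega), ?_⟩
  apply List.mem_map.2
  refine ⟨qy.toNat, List.mem_range.2 ?_, ?_⟩
  · rw [e1]; omega
  · rw [e1, e2]

lemma mem_allCells_inB {maze : List String} {q : Int × Int} (h : q ∈ allCells maze) :
    inB maze q = true := by
  rcases List.mem_flatMap.1 h with ⟨x, hx, hmem⟩
  rcases List.mem_map.1 hmem with ⟨y, hy, rfl⟩
  rw [List.mem_range] at hx hy
  simp only [inB, Bool.and_eq_true, decide_eq_true_eq]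
  refine ⟨⟨⟨?_, ?_⟩, ?_⟩, ?_⟩ <;> simp_all

lemma length_filter_mono {α : Type} (L : List α) (p q : α → Bool)
    (h : ∀ a ∈ L, p a = true → q a = true) :
    (L.filter p).length ≤ (L.filter q).length := by
  induction L with
  | nil => simp
  | cons a L ih =>
    have ih' := ih (fun b hb => h b (List.mem_cons_of_mem _ hb))
    by_cases hp : p a = true
    · rw [List.filter_cons_of_pos hp, List.filter_cons_of_pos (h a List.mem_cons_self hp),
        List.length_cons, List.length_cons]
      omega
    · rw [Bool.not_eq_true] at hp
      rw [List.filter_cons_of_neg (by simp [hp])]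
      by_cases hq : q a = true
      · rw [List.filter_cons_of_pos hq, List.length_cons]
        omega
      · rw [Bool.not_eq_true] at hq
        rw [List.filter_cons_of_neg (by simp [hq])]
        exact ih'

lemma len_filter_extend (q : Int × Int) (seen : List (Int × Int)) (hqs : q ∉ seen) :
    ∀ L : List (Int × Int), q ∈ L →
    (L.filter (fun a => decide (a ∉ seen ++ [q]))).length + 1 ≤
      (L.filter (fun a => decide (a ∉ seen))).length := by
  intro L
  induction L with
  | nil => simp
  | cons a L ih =>
    intro hqL
    have mono := length_filter_mono L (fun b => decide (b ∉ seen ++ [q]))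
      (fun b => decide (b ∉ seen))
      (by intro b _ hb
          simp only [decide_eq_true_eq, List.mem_append] at hb ⊢
          exact fun hc => hb (Or.inl hc))
    by_cases haq : a = q
    · subst haq
      rw [List.filter_cons_of_neg (by simp), List.filter_cons_of_pos (by simpa using hqs),
        List.length_cons]
      omega
    · rcases List.mem_cons.1 hqL with h | h
      · exact absurd h.symm haq
      · have ih' := ih h
        by_cases ha : a ∈ seen
        · rw [List.filter_cons_of_neg (by simp [ha]), List.filter_cons_of_neg (by simp [ha])]
          exact ih'
        · rw [List.filter_cons_of_pos (by simp [ha, haq]), List.filter_cons_of_pos (by simp [ha]),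
            List.length_cons, List.length_cons]
          omega

lemma unseen_step {maze : List String} (Δ : List (Int × Int)) :
    ∀ (seen : List (Int × Int)), Δ.Nodup → (∀ a ∈ Δ, a ∈ allCells maze) →
    (∀ a ∈ Δ, a ∉ seen) →
    unseenCnt maze (seen ++ Δ) + Δ.length ≤ unseenCnt maze seen := by
  induction Δ with
  | nil => intro seen _ _ _; simp
  | cons q Δ ih =>
    intro seen hnd hL hs
    have h1 : unseenCnt maze ((seen ++ [q]) ++ Δ) + Δ.length ≤ unseenCnt maze (seen ++ [q]) := by
      apply ih (seen ++ [q]) (List.Nodup.of_cons hnd)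
        (fun a ha => hL a (List.mem_cons_of_mem _ ha))
      intro a ha
      simp only [List.mem_append, List.mem_singleton]
      rintro (h | rfl)
      · exact hs a (List.mem_cons_of_mem _ ha) h
      · exact (List.nodup_cons.1 hnd).1 ha
    have h2 : unseenCnt maze (seen ++ [q]) + 1 ≤ unseenCnt maze seen :=
      len_filter_extend q seen (hs q List.mem_cons_self)
        (allCells maze) (hL q List.mem_cons_self)
    have e : seen ++ q :: Δ = (seen ++ [q]) ++ Δ := by simp
    rw [e]
    simp only [List.length_cons]
    omega

lemma freshNbrs_props {maze p seen} :
    (freshNbrs maze p seen).Nodup ∧ (∀ a ∈ freshNbrs maze p seen, a ∈ allCells maze) ∧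
      (∀ a ∈ freshNbrs maze p seen, a ∉ seen) := by
  refine ⟨freshNbrs_nodup maze p seen, ?_, ?_⟩
  · intro a ha; exact inB_mem_allCells (mem_freshNbrs.1 ha).2.1
  · intro a ha; exact (mem_freshNbrs.1 ha).2.2.2

-- A's worklist loop answers: is some RX-reachable cell boundary-adjacent?

lemma loopA_iff (maze : List String) :
    ∀ (fuel : Nat) (seen ps : List (Int × Int)), (∀ q ∈ ps, q ∈ seen) →
    unseenCnt maze seen + ps.length ≤ fuel →
    (loopA maze fuel seen ps = true ↔ ∃ q, RX maze seen ps q ∧ bAdj maze q = true) := by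
  intro fuel
  induction fuel with
  | zero =>
    intro seen ps _ hf
    have : ps = [] := by
      cases ps with
      | nil => rfl
      | cons a l => simp at hf
    subst this
    simp only [loopA]
    constructor
    · intro h; exact absurd h (by simp)
    · rintro ⟨q, hq, _⟩; exact absurd hq RX_nil
  | succ fuel ih =>
    intro seen ps hinv hf
    cases ps with
    | nil =>
      simp only [loopA]
      constructor
      · intro h; exact absurd h (by simp)
      · rintro ⟨q, hq, _⟩; exact absurd hq RX_nil
    | cons p rest =>
      simp only [loopA]
      by_cases hb : bAdj maze p = true
      · simp only [hb, if_true, true_iff]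
        exact ⟨p, RX.base List.mem_cons_self, hb⟩
      · rw [Bool.not_eq_true] at hb
        simp only [hb, Bool.false_eq_true, if_false]
        obtain ⟨hnd, hL, hs⟩ := freshNbrs_props (maze := maze) (p := p) (seen := seen)
        have hμ := unseen_step (maze := maze) (freshNbrs maze p seen) seen hnd hL hs
        have hinv' : ∀ q ∈ rest ++ freshNbrs maze p seen, q ∈ seen ++ freshNbrs maze p seen := by
          intro q hq
          rcases List.mem_append.1 hq with h | h
          · exact List.mem_append_left _ (hinv q (List.mem_cons_of_mem _ h))
          · exact List.mem_append_right _ h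
        have hf' : unseenCnt maze (seen ++ freshNbrs maze p seen) +
            (rest ++ freshNbrs maze p seen).length ≤ fuel := by
          simp only [List.length_append]
          simp only [List.length_cons] at hf
          omega
        rw [ih _ _ hinv' hf']
        constructor
        · rintro ⟨q, hq, hbq⟩
          exact ⟨q, untransfer hq, hbq⟩
        · rintro ⟨q, hq, hbq⟩
          rcases transfer (hinv p List.mem_cons_self) hq with h | rfl
          · exact ⟨q, h, hbq⟩
          · rw [hb] at hbq; exact absurd hbq (by simp)

lemma unseenCnt_le (maze : List String) (seen : List (Int × Int)) :
    unseenCnt maze seen ≤ (allCells maze).length :=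
  List.length_filter_le _ _

-- ===== B-side lemmas: the sweep fixed point computes exactly the Reach set =====

lemma moves_neg {d : Int × Int} (h : d ∈ movesL) : (-d.1, -d.2) ∈ movesL := by
  fin_cases h <;> decide

-- generic facts about the sweep's foldl (append-only accumulator)

lemma sweep_foldl_mem {maze : List String} {a : Int × Int} :
    ∀ (L : List (Int × Int)) (acc : List (Int × Int)), a ∈ acc →
    a ∈ L.foldl (fun acc q => if condS maze acc q then acc ++ [q] else acc) acc := by
  intro L
  induction L with
  | nil => intro acc h; exact h
  | cons q L ih =>
    intro acc h
    simp only [List.foldl_cons]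
    by_cases hc : condS maze acc q = true
    · rw [hc]; simp only [if_true]; exact ih _ (List.mem_append_left _ h)
    · rw [Bool.not_eq_true] at hc; rw [hc]; simp only [Bool.false_eq_true, if_false]
      exact ih _ h

lemma sweep_foldl_len {maze : List String} :
    ∀ (L : List (Int × Int)) (acc : List (Int × Int)),
    acc.length ≤ (L.foldl (fun acc q => if condS maze acc q then acc ++ [q] else acc) acc).length := by
  intro L
  induction L with
  | nil => intro acc; simp
  | cons q L ih =>
    intro acc
    simp only [List.foldl_cons]
    by_cases hc : condS maze acc q = true
    · rw [hc]; simp only [if_true]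
      have := ih (acc ++ [q])
      simp only [List.length_append, List.length_cons, List.length_nil] at this
      omega
    · rw [Bool.not_eq_true] at hc; rw [hc]; simp only [Bool.false_eq_true, if_false]
      exact ih acc

lemma sweep_foldl_fix {maze : List String} :
    ∀ (L : List (Int × Int)) (acc : List (Int × Int)),
    L.foldl (fun acc q => if condS maze acc q then acc ++ [q] else acc) acc = acc →
    ∀ q ∈ L, condS maze acc q = false := by
  intro L
  induction L with
  | nil => intro acc _ q hq; simp at hq
  | cons q L ih =>
    intro acc hfix p hp
    simp only [List.foldl_cons] at hfix
    by_cases hc : condS maze acc q = true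
    · exfalso
      rw [hc] at hfix
      simp only [if_true] at hfix
      have := sweep_foldl_len (maze := maze) L (acc ++ [q])
      rw [hfix] at this
      simp at this
    · rw [Bool.not_eq_true] at hc
      rw [hc] at hfix
      simp only [Bool.false_eq_true, if_false] at hfix
      rcases List.mem_cons.1 hp with rfl | hp
      · exact hc
      · exact ih acc hfix p hp

lemma sweep_foldl_sound {maze : List String} {s : Int × Int} :
    ∀ (L : List (Int × Int)) (acc : List (Int × Int)),
    (∀ a ∈ acc, Reach maze s a) → (∀ q ∈ L, q ∈ allCells maze) →
    ∀ a ∈ L.foldl (fun acc q => if condS maze acc q then acc ++ [q] else acc) acc,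
      Reach maze s a := by
  intro L
  induction L with
  | nil => intro acc h _ a ha; exact h a ha
  | cons q L ih =>
    intro acc hacc hL
    simp only [List.foldl_cons]
    by_cases hc : condS maze acc q = true
    · rw [hc]; simp only [if_true]
      apply ih
      · intro a ha
        rcases List.mem_append.1 ha with h | h
        · exact hacc a h
        · rw [List.mem_singleton] at h
          subst h
          simp only [condS, Bool.and_eq_true, List.any_eq_true] at hc
          obtain ⟨⟨_, hsp⟩, d, hd, hmem⟩ := hc
          have hp : (a.1 + d.1, a.2 + d.2) ∈ acc := by
            simpa using hmem
          refine Reach.step (hacc _ hp) ⟨(-d.1, -d.2), moves_neg hd, ?_⟩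
            (mem_allCells_inB (hL a List.mem_cons_self)) hsp
          simp only
          rw [Prod.ext_iff]
          constructor <;> simp
      · intro p hp; exact hL p (List.mem_cons_of_mem _ hp)
    · rw [Bool.not_eq_true] at hc; rw [hc]; simp only [Bool.false_eq_true, if_false]
      exact ih acc hacc (fun p hp => hL p (List.mem_cons_of_mem _ hp))

lemma sweep_foldl_nodup {maze : List String} :
    ∀ (L : List (Int × Int)) (acc : List (Int × Int)), acc.Nodup →
    (L.foldl (fun acc q => if condS maze acc q then acc ++ [q] else acc) acc).Nodup := by
  intro L
  induction L with
  | nil => intro acc h; exact h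
  | cons q L ih =>
    intro acc h
    simp only [List.foldl_cons]
    by_cases hc : condS maze acc q = true
    · rw [hc]; simp only [if_true]
      apply ih
      have hnm : q ∉ acc := by
        simp only [condS, Bool.and_eq_true] at hc
        simpa using hc.1.1
      exact List.Nodup.append h (List.nodup_singleton q)
        (by intro a ha hq'; rw [List.mem_singleton] at hq'; subst hq'; exact hnm ha)
    · rw [Bool.not_eq_true] at hc; rw [hc]; simp only [Bool.false_eq_true, if_false]
      exact ih acc h

lemma sweep_foldl_sub {maze : List String} :
    ∀ (L : List (Int × Int)) (acc : List (Int × Int)),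
    (∀ a ∈ acc, a ∈ allCells maze) → (∀ q ∈ L, q ∈ allCells maze) →
    ∀ a ∈ L.foldl (fun acc q => if condS maze acc q then acc ++ [q] else acc) acc,
      a ∈ allCells maze := by
  intro L
  induction L with
  | nil => intro acc h _ a ha; exact h a ha
  | cons q L ih =>
    intro acc hacc hL
    simp only [List.foldl_cons]
    by_cases hc : condS maze acc q = true
    · rw [hc]; simp only [if_true]
      apply ih
      · intro a ha
        rcases List.mem_append.1 ha with h | h
        · exact hacc a h
        · rw [List.mem_singleton] at h; subst h; exact hL a List.mem_cons_self
      · intro p hp; exact hL p (List.mem_cons_of_mem _ hp)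
    · rw [Bool.not_eq_true] at hc; rw [hc]; simp only [Bool.false_eq_true, if_false]
      exact ih acc hacc (fun p hp => hL p (List.mem_cons_of_mem _ hp))

lemma sweep_foldl_grow {maze : List String} :
    ∀ (L : List (Int × Int)) (acc : List (Int × Int)),
    L.foldl (fun acc q => if condS maze acc q then acc ++ [q] else acc) acc ≠ acc →
    acc.length + 1 ≤
      (L.foldl (fun acc q => if condS maze acc q then acc ++ [q] else acc) acc).length := by
  intro L
  induction L with
  | nil => intro acc h; simp at h
  | cons q L ih =>
    intro acc h
    simp only [List.foldl_cons] at h ⊢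
    by_cases hc : condS maze acc q = true
    · rw [hc] at h ⊢
      simp only [if_true] at h ⊢
      have := sweep_foldl_len (maze := maze) L (acc ++ [q])
      simp only [List.length_append, List.length_cons, List.length_nil] at this
      omega
    · rw [Bool.not_eq_true] at hc
      rw [hc] at h ⊢
      simp only [Bool.false_eq_true, if_false] at h ⊢
      exact ih acc h

-- repackage the generic foldl facts as facts about sweep / fixB

lemma sweep_mem {maze R a} (h : a ∈ R) : a ∈ sweep maze R :=
  sweep_foldl_mem _ _ h

lemma fixB_mem {maze} : ∀ (fuel : Nat) (R : List (Int × Int)) (a : Int × Int),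
    a ∈ R → a ∈ fixB maze fuel R := by
  intro fuel
  induction fuel with
  | zero => intro R a h; exact h
  | succ fuel ih =>
    intro R a h
    simp only [fixB]
    by_cases hfx : sweep maze R = R
    · rw [if_pos hfx]; exact h
    · rw [if_neg hfx]; exact ih _ _ (sweep_mem h)

lemma fixB_sound {maze s} : ∀ (fuel : Nat) (R : List (Int × Int)),
    (∀ a ∈ R, Reach maze s a) → ∀ a ∈ fixB maze fuel R, Reach maze s a := by
  intro fuel
  induction fuel with
  | zero => intro R h a ha; exact h a ha
  | succ fuel ih =>
    intro R h
    simp only [fixB]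
    by_cases hfx : sweep maze R = R
    · rw [if_pos hfx]; exact h
    · rw [if_neg hfx]
      exact ih _ (sweep_foldl_sound _ _ h (fun q hq => hq))

lemma fixB_fix {maze} : ∀ (fuel : Nat) (R : List (Int × Int)), R.Nodup →
    (∀ a ∈ R, a ∈ allCells maze) → (allCells maze).length + 1 ≤ fuel + R.length →
    sweep maze (fixB maze fuel R) = fixB maze fuel R := by
  intro fuel
  induction fuel with
  | zero =>
    intro R hnd hsub hb
    exfalso
    have hle : R.length ≤ (allCells maze).length := by
      classical
      have h1 : R.toFinset.card = R.length := List.toFinset_card_of_nodup hnd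
      have h2 : R.toFinset ⊆ (allCells maze).toFinset := by
        intro a ha
        rw [List.mem_toFinset] at ha ⊢
        exact hsub a ha
      have h3 := Finset.card_le_card h2
      have h4 := (allCells maze).toFinset_card_le
      omega
    omega
  | succ fuel ih =>
    intro R hnd hsub hb
    simp only [fixB]
    by_cases hfx : sweep maze R = R
    · rw [if_pos hfx]; exact hfx
    · rw [if_neg hfx]
      have hgrow := sweep_foldl_grow (maze := maze) (allCells maze) R hfx
      apply ih
      · exact sweep_foldl_nodup _ _ hnd
      · exact sweep_foldl_sub _ _ hsub (fun q hq => hq)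
      · have : R.length + 1 ≤ (sweep maze R).length := hgrow
        omega

-- a stable reached set is closed under expansion into adjacent spaces
lemma fix_closed {maze : List String} {F : List (Int × Int)} (hfx : sweep maze F = F)
    {q : Int × Int} (hq : q ∈ allCells maze) (hsp : isSpace maze q = true)
    (hnb : ∃ d ∈ movesL, (q.1 + d.1, q.2 + d.2) ∈ F) : q ∈ F := by
  have hc := sweep_foldl_fix (maze := maze) (allCells maze) F hfx q hq
  simp only [condS] at hc
  by_contra hqF
  rw [Bool.and_eq_false_iff, Bool.and_eq_false_iff] at hc
  rcases hc with (hc | hc) | hc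
  · rw [List.contains_eq_mem] at hc; simp at hc; exact hqF hc
  · rw [hsp] at hc; simp at hc
  · rw [List.any_eq_false] at hc
    obtain ⟨d, hd, hmem⟩ := hnb
    have := hc d hd
    rw [List.contains_eq_mem] at this
    simp at this
    exact this hmem

lemma fix_complete {maze : List String} {s : Int × Int} {F : List (Int × Int)}
    (hfx : sweep maze F = F) (hsF : s ∈ F) :
    ∀ {q : Int × Int}, Reach maze s q → q ∈ F := by
  intro q h
  induction h with
  | base => exact hsF
  | step _ hd hb hsp ih =>
    rename_i p q' _
    obtain ⟨d, hdm, rfl⟩ := hd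
    apply fix_closed hfx (inB_mem_allCells hb) hsp
    refine ⟨(-d.1, -d.2), moves_neg hdm, ?_⟩
    have e : ((p.1 + d.1) + -d.1, (p.2 + d.2) + -d.2) = p := by
      rw [Prod.ext_iff]; constructor <;> simp
    rw [e]
    exact ih

-- katePositions only lists in-bounds cells
lemma mem_katePositions_inB {maze : List String} {q : Int × Int}
    (h : q ∈ katePositions maze) : inB maze q = true := by
  rcases List.mem_flatMap.1 h with ⟨rx, hrx, hmem⟩
  rcases List.mem_filterMap.1 hmem with ⟨cy, hcy, heq⟩
  by_cases hk : cy.1 = 'k'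
  · rw [if_pos hk, Option.some_inj] at heq
    subst heq
    obtain ⟨-, hrlt', hrget⟩ := List.mem_zipIdx hrx
    obtain ⟨-, hclt', hcget⟩ := List.mem_zipIdx hcy
    have hrlt : rx.2 < maze.length := by omega
    have hclt : cy.2 < rx.1.toList.length := by omega
    have hrow : rowAt maze ((rx.2 : Nat) : Int) = rx.1.toList := by
      simp only [rowAt, PySem.List.pyGet?_natCast]
      rw [List.getElem?_eq_getElem hrlt]
      simp only [Nat.sub_zero] at hrget
      rw [← hrget]
      rfl
    simp only [inB, Bool.and_eq_true, decide_eq_true_eq]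
    refine ⟨⟨⟨by positivity, by exact_mod_cast hrlt⟩, by positivity⟩, ?_⟩
    rw [hrow]
    exact_mod_cast hclt
  · rw [if_neg hk] at heq; exact absurd heq (by simp)

-- B's result characterised the same way as A's
lemma altB_iff (maze : List String) (s : Int × Int) (hs : s ∈ katePositions maze) :
    ((fixB maze ((allCells maze).length + 1) [s]).any (fun p => bAdj maze p) = true ↔
      ∃ q, Reach maze s q ∧ bAdj maze q = true) := by
  have hsA : s ∈ allCells maze := inB_mem_allCells (mem_katePositions_inB hs)
  have hnd : ([s] : List (Int × Int)).Nodup := by simp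
  have hsub : ∀ a ∈ ([s] : List (Int × Int)), a ∈ allCells maze := by
    intro a ha; rw [List.mem_singleton] at ha; subst ha; exact hsA
  have hb : (allCells maze).length + 1 ≤ ((allCells maze).length + 1) +
      ([s] : List (Int × Int)).length := by simp
  have hfx := fixB_fix ((allCells maze).length + 1) [s] hnd hsub hb
  have hsF : s ∈ fixB maze ((allCells maze).length + 1) [s] :=
    fixB_mem _ _ _ (List.mem_singleton.2 rfl)
  rw [List.any_eq_true]
  constructor
  · rintro ⟨q, hqF, hbq⟩
    refine ⟨q, ?_, hbq⟩
    refine fixB_sound _ _ ?_ q hqF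
    intro a ha
    rw [List.mem_singleton] at ha
    subst ha
    exact Reach.base
  · rintro ⟨q, hq, hbq⟩
    exact ⟨q, fix_complete hfx hsF hq, hbq⟩

-- ===== VERDICT (by name: the statement is the Claim_ definition above) =====
theorem can_kate_escape_spec : Claim_equal_can_kate_escape := by
  intro maze _ _
  unfold Spec_can_kate_escape can_kate_escape can_kate_escape_alt
  cases hk : katePositions maze with
  | nil => simp
  | cons s t =>
    cases t with
    | cons b t' => simp
    | nil =>
      simp only [List.length_cons, List.length_nil, List.headD]
      norm_num
      have hinv : ∀ q ∈ [s], q ∈ [s] := fun q hq => hq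
      have hfuel : unseenCnt maze [s] + ([s] : List (Int × Int)).length ≤
          (allCells maze).length + 1 := by
        have := unseenCnt_le maze [s]
        simp only [List.length_cons, List.length_nil]
        omega
      have hA := loopA_iff maze ((allCells maze).length + 1) [s] [s] hinv hfuel
      have hsk : s ∈ katePositions maze := by rw [hk]; exact List.mem_singleton.2 rfl
      have hB := altB_iff maze s hsk
      have : loopA maze ((allCells maze).length + 1) [s] [s] = true ↔
          (fixB maze ((allCells maze).length + 1) [s]).any (fun p => bAdj maze p) = true := by
        rw [hA, hB]
        constructor
        · rintro ⟨q, hq, hbq⟩; exact ⟨q, RX_iff_Reach.1 hq, hbq⟩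
        · rintro ⟨q, hq, hbq⟩; exact ⟨q, RX_iff_Reach.2 hq, hbq⟩
      exact Bool.eq_iff_iff.2 this
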